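-- pv_equiv track=rewrite | github.com/haroonkhan02/15-112 | Week 2/hw2.py | carrylessMultiply
-- ===== SOURCE A (Python) =====
-- def carrylessAdd(x1, x2):
--     count=0
--     total=0
--     if x1==0 or x2==0:
--         return x1+x2
--     while (x1>0 or x2>0):
--         a=((x1%10) + (x2%10)) %10
--         total= a*(10**count)+total
--         count+=1
--         x1//=10
--         x2//=10
--     return total
--
-- def carrylessMultiply(x1, x2):
--     count1=0
--     total1=0
--     count2=0
--     finaltotal=0
--     temp=x1
--     while x2>0:
--         while x1>0:
--             a1=x1%10
--             b1=x2%10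
--             total1 = (((a1*b1)%10)*(10**count1)) + total1
--             x1//=10
--             count1 +=1
--         total1=total1*(10**count2)
--         finaltotal=carrylessAdd(total1,finaltotal)
--         total1=0
--         x2//=10
--         count2+=1
--         count1=0
--         x1=temp
--     return finaltotal
-- ===== SOURCE B (Python) =====
-- def carrylessMultiply(x1, x2):
--     # Column-sum reformulation: digit lists + one accumulator per output column,
--     # then a single most-significant-first Horner reassembly (mod 10 per column).
--     if x1 <= 0 or x2 <= 0:
--         return 0
--     a = []
--     t = x1
--     while t > 0:
--         a.append(t % 10)
--         t //= 10
--     b = []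
--     t = x2
--     while t > 0:
--         b.append(t % 10)
--         t //= 10
--     cols = [0] * (len(a) + len(b))
--     for j, e in enumerate(b):
--         for i, d in enumerate(a):
--             cols[i + j] += (d * e) % 10
--     out = 0
--     for k in range(len(cols) - 1, -1, -1):
--         out = out * 10 + cols[k] % 10
--     return out
-- ===== Notes on version B (the rewrite author's own statement) =====
-- stated objective: alternative
-- what changed: Replaces A's row-by-row scheme (re-scan x1 per digit of x2, shift each row by a power of 10, fold rows with a digitwise carrylessAdd loop) by extracting both digit lists once, accumulating (d*e)%10 into one per-column array over all digit pairs, and assembling the result in a single most-significant-first Horner pass taking each column mod 10.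
import Mathlib
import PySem

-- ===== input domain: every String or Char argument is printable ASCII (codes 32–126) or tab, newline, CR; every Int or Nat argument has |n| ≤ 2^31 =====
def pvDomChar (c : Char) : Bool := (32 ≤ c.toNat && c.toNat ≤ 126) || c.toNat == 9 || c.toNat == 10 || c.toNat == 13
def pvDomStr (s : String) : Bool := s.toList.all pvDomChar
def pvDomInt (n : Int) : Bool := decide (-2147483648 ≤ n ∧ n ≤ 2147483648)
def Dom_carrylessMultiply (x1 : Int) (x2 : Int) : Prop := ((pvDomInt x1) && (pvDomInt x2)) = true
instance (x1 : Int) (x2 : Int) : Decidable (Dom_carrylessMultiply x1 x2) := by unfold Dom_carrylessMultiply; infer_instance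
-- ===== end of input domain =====

-- B replaces A's row-by-row carrylessAdd folding with per-column accumulators and one Horner pass (alternative algorithm, same asymptotics in practice).


-- termination helpers for the while-loop recursions (cited by decreasing_by)
theorem pvFd10_toNat_le (x : Int) : (PySem.Int.floordiv x 10).toNat ≤ x.toNat := by
  rw [PySem.Int.floordiv_eq_ediv_of_pos (by norm_num)]; omega

theorem pvFd10_toNat_lt (x : Int) (h : 0 < x) : (PySem.Int.floordiv x 10).toNat < x.toNat := by
  rw [PySem.Int.floordiv_eq_ediv_of_pos (by norm_num)]; omega

-- ===== PORT A =====
-- the 'while (x1>0 or x2>0)' loop of carrylessAdd (count is a Python int that starts at 0 and is only incremented, so Nat)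
def caddGo (x1 x2 : Int) (count : Nat) (total : Int) : Int :=
  if 0 < x1 ∨ 0 < x2 then
    let a := PySem.Int.mod (PySem.Int.mod x1 10 + PySem.Int.mod x2 10) 10
    caddGo (PySem.Int.floordiv x1 10) (PySem.Int.floordiv x2 10) (count + 1) (a * 10 ^ count + total)
  else total
termination_by x1.toNat + x2.toNat
decreasing_by
  rcases ‹0 < x1 ∨ 0 < x2› with h | h
  · have := pvFd10_toNat_lt x1 h; have := pvFd10_toNat_le x2; omega
  · have := pvFd10_toNat_le x1; have := pvFd10_toNat_lt x2 h; omega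

def carrylessAddA (x1 x2 : Int) : Int :=
  if x1 = 0 ∨ x2 = 0 then x1 + x2 else caddGo x1 x2 0 0

-- the inner 'while x1>0' loop of carrylessMultiply
def mulInner (x1 x2 : Int) (count1 : Nat) (total1 : Int) : Int :=
  if h : 0 < x1 then
    mulInner (PySem.Int.floordiv x1 10) x2 (count1 + 1)
      (PySem.Int.mod (PySem.Int.mod x1 10 * PySem.Int.mod x2 10) 10 * 10 ^ count1 + total1)
  else total1
termination_by x1.toNat
decreasing_by exact pvFd10_toNat_lt x1 h

-- the outer 'while x2>0' loop; x1 is reset to temp before every inner loop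
def mulOuter (x2 : Int) (count2 : Nat) (finaltotal temp : Int) : Int :=
  if h : 0 < x2 then
    mulOuter (PySem.Int.floordiv x2 10) (count2 + 1)
      (carrylessAddA (mulInner temp x2 0 0 * 10 ^ count2) finaltotal) temp
  else finaltotal
termination_by x2.toNat
decreasing_by exact pvFd10_toNat_lt x2 h

def carrylessMultiply (x1 : Int) (x2 : Int) : Int := mulOuter x2 0 0 x1

-- ===== PORT B =====
-- the digit-extraction while loop (least-significant digit first)
def digitsB (t : Int) : List Int :=
  if h : 0 < t then PySem.Int.mod t 10 :: digitsB (PySem.Int.floordiv t 10) else []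
termination_by t.toNat
decreasing_by exact pvFd10_toNat_lt t h

-- inner 'for i, d in enumerate(a)' loop: cols[i+j] += (d*e)%10 (i+j is always in range, so set/getD is exact)
def addRowB (c : List Int) (j : Nat) (e : Int) (a : List Int) (i : Nat) : List Int :=
  match a with
  | [] => c
  | d :: rest =>
      addRowB (c.set (i + j) (c.getD (i + j) 0 + PySem.Int.mod (d * e) 10)) j e rest (i + 1)

-- outer 'for j, e in enumerate(b)' loop
def buildColsB (c : List Int) (a : List Int) (b : List Int) (j : Nat) : List Int :=
  match b with
  | [] => c
  | e :: rest => buildColsB (addRowB c j e a 0) a rest (j + 1)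

-- 'for k in range(len(cols)-1, -1, -1): out = out*10 + cols[k] % 10' — the countdown loop is exactly foldr over cols
def hornerB (cols : List Int) : Int :=
  cols.foldr (fun d out => out * 10 + PySem.Int.mod d 10) 0

def carrylessMultiply_alt (x1 : Int) (x2 : Int) : Int :=
  if x1 ≤ 0 ∨ x2 ≤ 0 then 0
  else
    let a := digitsB x1
    let b := digitsB x2
    hornerB (buildColsB (List.replicate (a.length + b.length) 0) a b 0)

-- ===== PRECONDITION & SPEC =====
def Spec_carrylessMultiply (x1 : Int) (x2 : Int) (out : Int) : Prop := out = carrylessMultiply_alt x1 x2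
instance (x1 : Int) (x2 : Int) (out : Int) : Decidable (Spec_carrylessMultiply x1 x2 out) := by unfold Spec_carrylessMultiply; infer_instance

-- ===== CLAIM (what is proved, stated in full; the proofs are below) =====
def Claim_equal_carrylessMultiply : Prop := ∀ (x1 : Int) (x2 : Int), Dom_carrylessMultiply x1 x2 → Spec_carrylessMultiply x1 x2 (carrylessMultiply x1 x2)

-- ===== LEMMAS AND PROOFS =====

@[simp] theorem pvMod10 (x : Int) : PySem.Int.mod x 10 = x % 10 :=
  PySem.Int.mod_eq_emod_of_pos (by norm_num)
@[simp] theorem pvFd10 (x : Int) : PySem.Int.floordiv x 10 = x / 10 :=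
  PySem.Int.floordiv_eq_ediv_of_pos (by norm_num)

-- value of a least-significant-first digit list
def dval : List Int → Int
  | [] => 0
  | d :: l => d + 10 * dval l

-- digitwise carryless add with copy-padding (the shape carrylessAdd produces)
def cadd : List Int → List Int → List Int
  | [], m => m
  | l, [] => l
  | d :: l, e :: m => (d + e) % 10 :: cadd l m

def rowmul (a : List Int) (b : Int) : List Int := a.map (fun d => d * b % 10)

-- reference result of A's outer loop as a digit list
def Mref (a : List Int) : List Int → List Int
  | [] => []
  | e :: bs => cadd (rowmul a e) (0 :: Mref a bs)

def padL (c : Nat) (l : List Int) : List Int := List.replicate c 0 ++ l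

def okd (l : List Int) : Prop := ∀ d ∈ l, 0 ≤ d ∧ d < 10

theorem cadd_nil_right (l : List Int) : cadd l [] = l := by cases l <;> rfl

theorem okd_nil : okd [] := by intro d h; cases h

theorem okd_cons {d : Int} {l : List Int} (hd : 0 ≤ d ∧ d < 10) (hl : okd l) : okd (d :: l) := by
  intro x hx
  rw [List.mem_cons] at hx
  rcases hx with rfl | hx
  · exact hd
  · exact hl _ hx

theorem okd_tail {d : Int} {l : List Int} (h : okd (d :: l)) : okd l := fun x hx => h x (List.mem_cons_of_mem _ hx)

theorem okd_getD {l : List Int} (h : okd l) (k : Nat) : 0 ≤ l.getD k 0 ∧ l.getD k 0 < 10 := by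
  induction l generalizing k with
  | nil => simp
  | cons d t ih =>
    cases k with
    | zero => simpa using h d (by simp)
    | succ k => simpa using ih (okd_tail h) k

theorem dval_nonneg {l : List Int} (h : okd l) : 0 ≤ dval l := by
  induction l with
  | nil => simp [dval]
  | cons d t ih =>
    have hd := h d (by simp)
    have ht := ih (okd_tail h)
    simp only [dval]; omega

theorem okd_cadd {l m : List Int} (hl : okd l) (hm : okd m) : okd (cadd l m) := by
  induction l generalizing m with
  | nil => simpa [cadd] using hm
  | cons d t ih =>
    cases m with
    | nil => simpa [cadd_nil_right] using hl
    | cons e s =>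
      refine okd_cons ⟨Int.emod_nonneg _ (by norm_num), Int.emod_lt_of_pos _ (by norm_num)⟩ ?_
      exact ih (okd_tail hl) (okd_tail hm)

theorem okd_rowmul (a : List Int) (b : Int) : okd (rowmul a b) := by
  intro d hd
  simp only [rowmul, List.mem_map] at hd
  obtain ⟨x, _, rfl⟩ := hd
  exact ⟨Int.emod_nonneg _ (by norm_num), Int.emod_lt_of_pos _ (by norm_num)⟩

theorem okd_Mref (a bs : List Int) : okd (Mref a bs) := by
  induction bs with
  | nil => exact okd_nil
  | cons e t ih => exact okd_cadd (okd_rowmul a e) (okd_cons (by norm_num) ih)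

theorem dval_eq_zero {l : List Int} (h : ∀ k, l.getD k 0 = 0) : dval l = 0 := by
  induction l with
  | nil => rfl
  | cons d t ih =>
    have h0 := h 0
    simp only [List.getD_cons_zero] at h0
    have := ih (fun k => by simpa using h (k + 1))
    simp [dval, h0, this]

theorem dval_eq_of_getD {l m : List Int} (h : ∀ k, l.getD k 0 = m.getD k 0) : dval l = dval m := by
  induction l generalizing m with
  | nil =>
    have : dval m = 0 := dval_eq_zero (fun k => by simpa using (h k).symm)
    simp [dval, this]
  | cons d t ih =>
    cases m with
    | nil =>
      have : dval (d :: t) = 0 := dval_eq_zero (fun k => by simpa using h k)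
      simpa [dval] using this
    | cons e s =>
      have h0 := h 0
      simp only [List.getD_cons_zero] at h0
      have := ih (m := s) (fun k => by simpa using h (k + 1))
      simp [dval, h0, this]

theorem getD_mod {l : List Int} (hl : okd l) (k : Nat) : l.getD k 0 % 10 = l.getD k 0 := by
  have := okd_getD hl k; omega

theorem cadd_getD {l m : List Int} (hl : okd l) (hm : okd m) (k : Nat) :
    (cadd l m).getD k 0 = (l.getD k 0 + m.getD k 0) % 10 := by
  induction l generalizing m k with
  | nil =>
    have := okd_getD hm k
    simp only [cadd, List.getD_nil]
    omega
  | cons d t ih =>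
    cases m with
    | nil =>
      have := okd_getD hl k
      simp only [cadd_nil_right, List.getD_nil]
      omega
    | cons e s =>
      cases k with
      | zero => simp [cadd]
      | succ k =>
        simpa [cadd] using ih (okd_tail hl) (okd_tail hm) k

theorem padL_getD (c : Nat) (l : List Int) (k : Nat) :
    (padL c l).getD k 0 = if k < c then 0 else l.getD (k - c) 0 := by
  induction c generalizing k with
  | zero => simp [padL]
  | succ c ih =>
    have : padL (c + 1) l = 0 :: padL c l := by simp [padL, List.replicate_succ]
    rw [this]
    cases k with
    | zero => simp
    | succ k => simpa using ih k

theorem dval_padL (c : Nat) (l : List Int) : dval (padL c l) = 10 ^ c * dval l := by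
  induction c with
  | zero => simp [padL]
  | succ c ih =>
    have : padL (c + 1) l = 0 :: padL c l := by simp [padL, List.replicate_succ]
    rw [this]
    simp only [dval, ih]
    ring

-- digit extraction of digitsB
theorem digitsB_getD (k : Nat) : ∀ x : Int, 0 ≤ x → (digitsB x).getD k 0 = x / 10 ^ k % 10 := by
  induction k with
  | zero =>
    intro x hx
    rw [digitsB]
    split
    · simp
    · have : x = 0 := by omega
      simp [this]
  | succ k ih =>
    intro x hx
    rw [digitsB]
    split
    · rename_i h
      simp only [pvFd10, List.getD_cons_succ]
      rw [ih (x / 10) (by omega)]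
      rw [pow_succ', Int.ediv_ediv_of_nonneg (by norm_num : (0:Int) ≤ 10)]
    · have : x = 0 := by omega
      simp [this]

theorem okd_digitsB (x : Int) : okd (digitsB x) := by
  induction hn : x.toNat using Nat.strong_induction_on generalizing x with
  | _ n ih =>
    rw [digitsB]
    split
    · rename_i h
      refine okd_cons ⟨?_, ?_⟩ (ih (PySem.Int.floordiv x 10).toNat ?_ _ rfl)
      · simpa using Int.emod_nonneg x (by norm_num : (10:Int) ≠ 0)
      · simpa using Int.emod_lt_of_pos x (by norm_num : (0:Int) < 10)
      · have := pvFd10_toNat_lt x h; omega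
    · exact okd_nil

theorem dval_digitsB (x : Int) (hx : 0 ≤ x) : dval (digitsB x) = x := by
  induction hn : x.toNat using Nat.strong_induction_on generalizing x with
  | _ n ih =>
    rw [digitsB]
    split
    · rename_i h
      have hrec : dval (digitsB (x / 10)) = x / 10 := by
        simpa using ih (PySem.Int.floordiv x 10).toNat (by have := pvFd10_toNat_lt x h; omega)
          (PySem.Int.floordiv x 10) (by simp; omega) rfl
      simp only [dval, pvFd10, pvMod10, hrec]
      omega
    · have : x = 0 := by omega
      simp [this, dval]

-- dval L / 10^k % 10 recovers the entries of an ok digit list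
theorem dval_div_pow (k : Nat) : ∀ L : List Int, okd L → dval L / 10 ^ k % 10 = L.getD k 0 := by
  induction k with
  | zero =>
    intro L hL
    cases L with
    | nil => simp [dval]
    | cons d t =>
      have hd := hL d (by simp)
      have ht := dval_nonneg (okd_tail hL)
      simp only [dval, pow_zero, Int.ediv_one, List.getD_cons_zero]
      omega
  | succ k ih =>
    intro L hL
    cases L with
    | nil => simp [dval]
    | cons d t =>
      have hd := hL d (by simp)
      have hd' := hL d (by simp)
      have h1 : dval (d :: t) / 10 = dval t := by
        simp only [dval]; omega
      rw [pow_succ', ← Int.ediv_ediv_of_nonneg (by norm_num : (0:Int) ≤ 10), h1, List.getD_cons_succ]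
      exact ih t (okd_tail hL)


theorem digitsB_pos {x : Int} (h : 0 < x) : digitsB x = x % 10 :: digitsB (x / 10) := by
  rw [digitsB]; simp [h]

theorem digitsB_nonpos {x : Int} (h : ¬ 0 < x) : digitsB x = [] := by
  rw [digitsB]; simp [h]

theorem okd_padL {l : List Int} (c : Nat) (h : okd l) : okd (padL c l) := by
  intro d hd
  rcases List.mem_append.mp hd with hd | hd
  · have := List.eq_of_mem_replicate hd; subst this; norm_num
  · exact h d hd

theorem cons_getD (d : Int) (l : List Int) (n : Nat) :
    (d :: l).getD n 0 = if n = 0 then d else l.getD (n - 1) 0 := by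
  cases n <;> simp

theorem cadd_digits_cons {x y : Int} (hx : 0 ≤ x) (hy : 0 ≤ y) (h : 0 < x ∨ 0 < y) :
    cadd (digitsB x) (digitsB y) = (x % 10 + y % 10) % 10 :: cadd (digitsB (x / 10)) (digitsB (y / 10)) := by
  have hz : digitsB (0 : Int) = [] := digitsB_nonpos (by norm_num)
  by_cases hx0 : 0 < x <;> by_cases hy0 : 0 < y
  · rw [digitsB_pos hx0, digitsB_pos hy0]; rfl
  · have hy1 : y = 0 := by omega
    subst hy1
    rw [digitsB_pos hx0]
    simp only [Int.zero_ediv, hz, cadd_nil_right]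
    congr 1
    omega
  · have hx1 : x = 0 := by omega
    subst hx1
    rw [digitsB_pos hy0]
    simp only [Int.zero_ediv, hz, cadd]
    congr 1
    omega
  · omega

theorem caddGo_char (x y : Int) (hx : 0 ≤ x) (hy : 0 ≤ y) (c : Nat) (t : Int) :
    caddGo x y c t = t + 10 ^ c * dval (cadd (digitsB x) (digitsB y)) := by
  induction hn : x.toNat + y.toNat using Nat.strong_induction_on generalizing x y c t with
  | _ n ih =>
    rw [caddGo]
    split
    · rename_i h
      simp only [pvMod10, pvFd10]
      have hlt : (x / 10).toNat + (y / 10).toNat < n := by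
        rcases h with h | h
        · have := pvFd10_toNat_lt x h; have := pvFd10_toNat_le y; simp only [pvFd10] at *; omega
        · have := pvFd10_toNat_le x; have := pvFd10_toNat_lt y h; simp only [pvFd10] at *; omega
      rw [ih ((x / 10).toNat + (y / 10).toNat) hlt (x / 10) (y / 10) (by omega) (by omega) _ _ rfl]
      rw [cadd_digits_cons hx hy h]
      simp only [dval, pow_succ]
      ring
    · rename_i h
      have hx0 : x = 0 := by omega
      have hy0 : y = 0 := by omega
      subst hx0; subst hy0
      rw [digitsB_nonpos (by norm_num)]
      simp [cadd, dval]

theorem carrylessAddA_char (x y : Int) (hx : 0 ≤ x) (hy : 0 ≤ y) :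
    carrylessAddA x y = dval (cadd (digitsB x) (digitsB y)) := by
  have hz : digitsB (0 : Int) = [] := digitsB_nonpos (by norm_num)
  unfold carrylessAddA
  split
  · rename_i h
    rcases h with rfl | rfl
    · rw [hz]
      simp only [cadd, zero_add]
      exact (dval_digitsB y hy).symm
    · rw [hz, cadd_nil_right]
      simp only [add_zero]
      exact (dval_digitsB x hx).symm
  · rw [caddGo_char x y hx hy 0 0]
    simp

theorem mulInner_char (x x2 : Int) (c : Nat) (t : Int) :
    mulInner x x2 c t = t + 10 ^ c * dval (rowmul (digitsB x) (x2 % 10)) := by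
  induction hn : x.toNat using Nat.strong_induction_on generalizing x c t with
  | _ n ih =>
    rw [mulInner]
    split
    · rename_i h
      simp only [pvMod10, pvFd10]
      rw [ih (x / 10).toNat (by have := pvFd10_toNat_lt x h; simp only [pvFd10] at this; omega)
        (x / 10) _ _ rfl]
      rw [digitsB_pos h]
      simp only [rowmul, List.map_cons, dval, pow_succ]
      ring
    · rename_i h
      rw [digitsB_nonpos h]
      simp [rowmul, dval]

theorem padL_cons_zero (j : Nat) (l : List Int) : padL j (0 :: l) = padL (j + 1) l := by
  simp [padL, List.replicate_succ']

theorem mulOuter_char (temp : Int) (x2 ft : Int) (hft : 0 ≤ ft) (c : Nat) :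
    mulOuter x2 c ft temp = dval (cadd (padL c (Mref (digitsB temp) (digitsB x2))) (digitsB ft)) := by
  induction hn : x2.toNat using Nat.strong_induction_on generalizing x2 ft c with
  | _ n ih =>
    rw [mulOuter]
    split
    · rename_i h
      simp only [pvFd10]
      -- the new finaltotal
      have hR : okd (rowmul (digitsB temp) (x2 % 10)) := okd_rowmul _ _
      have ht1 : 0 ≤ dval (rowmul (digitsB temp) (x2 % 10)) := dval_nonneg hR
      have hmi : mulInner temp x2 0 0 = dval (rowmul (digitsB temp) (x2 % 10)) := by
        rw [mulInner_char]; simp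
      have hu : mulInner temp x2 0 0 * 10 ^ c = dval (padL c (rowmul (digitsB temp) (x2 % 10))) := by
        rw [hmi, dval_padL]; ring
      have hft' : carrylessAddA (mulInner temp x2 0 0 * 10 ^ c) ft
          = dval (cadd (digitsB (dval (padL c (rowmul (digitsB temp) (x2 % 10))))) (digitsB ft)) := by
        rw [hu, carrylessAddA_char _ _ (by rw [dval_padL]; exact mul_nonneg (by positivity) ht1) hft]
      have hXok : okd (cadd (digitsB (dval (padL c (rowmul (digitsB temp) (x2 % 10))))) (digitsB ft)) :=
        okd_cadd (okd_digitsB _) (okd_digitsB _)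
      rw [hft', ih (x2 / 10).toNat
        (by have := pvFd10_toNat_lt x2 h; simp only [pvFd10] at this; omega)
        (x2 / 10) _ (dval_nonneg hXok) (c + 1) rfl]
      rw [digitsB_pos h]
      -- pointwise digit comparison
      apply dval_eq_of_getD
      intro k
      have hM' : okd (Mref (digitsB temp) (digitsB (x2 / 10))) := okd_Mref _ _
      have h0M' : okd ((0 : Int) :: Mref (digitsB temp) (digitsB (x2 / 10))) :=
        okd_cons (by norm_num) hM'
      simp only [Mref]
      rw [cadd_getD (okd_padL _ hM') (okd_digitsB _),
          cadd_getD (okd_padL _ (okd_cadd hR h0M')) (okd_digitsB _),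
          digitsB_getD k _ (dval_nonneg hXok), dval_div_pow k _ hXok,
          cadd_getD (okd_digitsB _) (okd_digitsB _),
          digitsB_getD k _ (dval_nonneg (okd_padL c hR)), dval_div_pow k _ (okd_padL c hR)]
      simp only [padL_getD]
      rw [cadd_getD hR h0M']
      simp only [cons_getD, Nat.sub_sub]
      have hFk := okd_getD (okd_digitsB ft) k
      split_ifs <;> omega
    · rename_i h
      rw [digitsB_nonpos h]
      have hrep : okd (padL c (Mref (digitsB temp) [])) := okd_padL _ (okd_Mref _ _)
      have : ∀ k, (cadd (padL c (Mref (digitsB temp) [])) (digitsB ft)).getD k 0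
          = (digitsB ft).getD k 0 := by
        intro k
        rw [cadd_getD hrep (okd_digitsB _)]
        have h1 : (padL c (Mref (digitsB temp) [])).getD k 0 = 0 := by
          rw [show Mref (digitsB temp) [] = [] from rfl, padL_getD]
          split <;> simp
        rw [h1]
        have := okd_getD (okd_digitsB ft) k
        omega
      rw [dval_eq_of_getD this, dval_digitsB ft hft]

theorem carrylessMultiplyA_char (x1 x2 : Int) :
    carrylessMultiply x1 x2 = dval (Mref (digitsB x1) (digitsB x2)) := by
  have hz : digitsB (0 : Int) = [] := digitsB_nonpos (by norm_num)
  rw [carrylessMultiply, mulOuter_char x1 x2 0 le_rfl 0, hz, cadd_nil_right]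
  simp [padL]

-- ===== B-side lemmas =====

theorem getD_set (l : List Int) (i : Nat) (v : Int) (k : Nat) (h : i < l.length) :
    (l.set i v).getD k 0 = if k = i then v else l.getD k 0 := by
  rw [List.getD_eq_getElem?_getD, List.getD_eq_getElem?_getD, List.getElem?_set]
  by_cases hk : k = i
  · subst hk; simp [h]
  · rw [if_neg (fun hh => hk hh.symm), if_neg hk]

theorem addRowB_length (a : List Int) (c : List Int) (j : Nat) (e : Int) (i : Nat) :
    (addRowB c j e a i).length = c.length := by
  induction a generalizing c i with
  | nil => rfl
  | cons d rest ih => rw [addRowB, ih]; simp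

theorem addRowB_getD (a : List Int) (c : List Int) (j : Nat) (e : Int) (i : Nat) (k : Nat)
    (hlen : i + j + a.length ≤ c.length) :
    (addRowB c j e a i).getD k 0 = c.getD k 0 + (padL (i + j) (rowmul a e)).getD k 0 := by
  induction a generalizing c i with
  | nil =>
    simp only [addRowB, rowmul, List.map_nil]
    rw [padL_getD]
    split <;> simp
  | cons d rest ih =>
    simp only [addRowB, pvMod10]
    have hin : i + j < c.length := by simp only [List.length_cons] at hlen; omega
    rw [ih _ (i + 1) (by simp only [List.length_set, List.length_cons] at hlen ⊢; omega)]
    rw [getD_set _ _ _ _ hin]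
    simp only [rowmul, List.map_cons, padL_getD, cons_getD, Nat.sub_sub]
    have h1 : i + 1 + j = i + j + 1 := by omega
    rw [h1]
    by_cases hk : k = i + j
    · subst hk
      split_ifs <;> omega
    · simp only [if_neg hk]
      split_ifs <;> omega

def rawS (a : List Int) : List Int → Nat → Nat → Int
  | [], _, _ => 0
  | e :: bs, j, k => (padL j (rowmul a e)).getD k 0 + rawS a bs (j + 1) k

theorem buildColsB_getD (a b : List Int) (c : List Int) (j : Nat) (k : Nat)
    (hlen : j + a.length + b.length ≤ c.length) :
    (buildColsB c a b j).getD k 0 = c.getD k 0 + rawS a b j k := by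
  induction b generalizing c j with
  | nil => simp [buildColsB, rawS]
  | cons e bs ih =>
    rw [buildColsB, ih _ (j + 1) (by rw [addRowB_length]; simp at hlen; omega)]
    rw [addRowB_getD a c j e 0 k (by simp at hlen ⊢; omega)]
    simp only [rawS, Nat.zero_add]
    ring

theorem rawS_mod (a : List Int) (b : List Int) (j k : Nat) :
    rawS a b j k % 10 = (padL j (Mref a b)).getD k 0 % 10 := by
  induction b generalizing j with
  | nil =>
    simp only [rawS, Mref]
    rw [padL_getD]
    split <;> simp
  | cons e bs ih =>
    have hR : okd (rowmul a e) := okd_rowmul a e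
    have hM' : okd (Mref a bs) := okd_Mref a bs
    have h0M' : okd ((0 : Int) :: Mref a bs) := okd_cons (by norm_num) hM'
    have IH := ih (j + 1)
    rw [← padL_cons_zero] at IH
    simp only [rawS, Mref]
    rw [show (padL j (cadd (rowmul a e) (0 :: Mref a bs))).getD k 0
          = if k < j then 0 else (cadd (rowmul a e) (0 :: Mref a bs)).getD (k - j) 0 from padL_getD _ _ _]
    by_cases hk : k < j
    · simp only [padL_getD, if_pos hk] at IH ⊢
      omega
    · rw [cadd_getD hR h0M']
      simp only [padL_getD, if_neg hk] at IH ⊢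
      omega

theorem mapmod_getD (l : List Int) (k : Nat) :
    (l.map (fun d => d % 10)).getD k 0 = l.getD k 0 % 10 := by
  induction l generalizing k with
  | nil => simp
  | cons d t ih =>
    cases k with
    | zero => simp
    | succ k => simpa using ih k

theorem hornerB_char (cols : List Int) : hornerB cols = dval (cols.map (fun d => d % 10)) := by
  induction cols with
  | nil => rfl
  | cons d t ih =>
    simp only [hornerB, List.foldr_cons, List.map_cons, dval, pvMod10] at ih ⊢
    rw [ih]
    ring

theorem Mref_nil_left (bs : List Int) : dval (Mref [] bs) = 0 := by
  induction bs with
  | nil => rfl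
  | cons e t ih =>
    show dval (cadd (rowmul [] e) (0 :: Mref [] t)) = 0
    simp only [rowmul, List.map_nil, cadd, dval, ih]
    ring

theorem replicate_getD (n k : Nat) : (List.replicate n (0 : Int)).getD k 0 = 0 := by
  have := padL_getD n [] k
  simp only [padL, List.append_nil] at this
  rw [this]
  split <;> simp

-- ===== VERDICT (by name: the statement is the Claim_ definition above) =====
theorem carrylessMultiply_spec : Claim_equal_carrylessMultiply := by
  intro x1 x2 _
  unfold Spec_carrylessMultiply carrylessMultiply_alt
  rw [carrylessMultiplyA_char]
  split
  · rename_i h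
    rcases h with h | h
    · rw [digitsB_nonpos (x := x1) (by omega)]
      exact Mref_nil_left _
    · rw [digitsB_nonpos (x := x2) (by omega)]
      rfl
  · rename_i h
    rw [not_or, not_le, not_le] at h
    rw [hornerB_char]
    apply dval_eq_of_getD
    intro k
    rw [mapmod_getD]
    rw [buildColsB_getD (digitsB x1) (digitsB x2)
      (List.replicate ((digitsB x1).length + (digitsB x2).length) 0) 0 k (by simp)]
    rw [replicate_getD]
    have := rawS_mod (digitsB x1) (digitsB x2) 0 k
    simp only [padL, List.replicate, List.nil_append] at this
    rw [getD_mod (okd_Mref (digitsB x1) (digitsB x2)) k] at this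
    omega
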